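-- pv_equiv track=rewrite | github.com/DrSh1ny/AED | ficha2/ficha2_B.py | algoritmo
-- ===== SOURCE A (Python) =====
-- def algoritmo(lista,valor):
--     comp=len(lista)
--
--     for i in range(comp):
--         soma=0
--         for j in range(i,comp):
--             soma+=lista[j]
--             if(soma==valor):
--                 return i
--
--     return -1
-- ===== SOURCE B (Python) =====
-- def algoritmo(lista, valor):
--     # Prefix sums + dict of earliest index per prefix value: one pass, O(n).
--     first = {0: 0}   # prefix value -> earliest index where it occurs
--     p = 0
--     best = -1
--     for j, x in enumerate(lista):
--         p += x
--         i = first.get(p - valor)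
--         if i is not None and (best == -1 or i < best):
--             best = i
--         if p not in first:
--             first[p] = j + 1
--     return best
-- ===== Notes on version B (the rewrite author's own statement) =====
-- stated objective: faster
-- what changed: Replaces the O(n^2) restart-the-sum double loop with a single left-to-right pass over prefix sums that keeps a dict mapping each prefix value to its earliest index and min-tracks the candidate start index.
import Mathlib
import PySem

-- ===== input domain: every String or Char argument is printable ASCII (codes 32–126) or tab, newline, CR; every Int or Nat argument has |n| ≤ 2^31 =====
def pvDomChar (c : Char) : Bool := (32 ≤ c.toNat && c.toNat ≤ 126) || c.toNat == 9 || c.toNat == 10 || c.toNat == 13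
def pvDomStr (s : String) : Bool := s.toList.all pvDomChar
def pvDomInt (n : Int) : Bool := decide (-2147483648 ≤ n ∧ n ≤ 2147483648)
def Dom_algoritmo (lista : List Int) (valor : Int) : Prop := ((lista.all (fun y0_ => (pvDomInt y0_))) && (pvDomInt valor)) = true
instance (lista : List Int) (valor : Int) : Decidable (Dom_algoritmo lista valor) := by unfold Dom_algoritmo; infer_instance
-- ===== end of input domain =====

-- B replaces A's O(n^2) restart-the-sum double loop with a single pass over prefix
-- sums keeping a dict of the earliest index of each prefix value (objective: faster).

-- ===== PORT A =====
-- A's inner loop 'for j in range(i, comp): soma += lista[j]; if soma == valor: return i':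
-- recursion over the remaining j-range with the running soma; True = A returns i here.
-- lista[j] is always in range (0 ≤ j < len), so pyGetD with default 0 is exact.
def pvInnerA (lista : List Int) (valor : Int) : Int → List Int → Bool
  | _, [] => false
  | soma, j :: js =>
    let soma' := soma + PySem.List.pyGetD lista j 0
    if soma' = valor then true else pvInnerA lista valor soma' js

-- A's outer loop 'for i in range(comp)': first i whose inner loop hits valor, else -1.
def pvOuterA (lista : List Int) (valor : Int) : List Int → Int
  | [] => -1
  | i :: is =>
    if pvInnerA lista valor 0 (PySem.List.pyRange i (lista.length : Int)) then i
    else pvOuterA lista valor is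

def algoritmo (lista : List Int) (valor : Int) : Int :=
  pvOuterA lista valor (PySem.List.pyRange 0 (lista.length : Int))

-- ===== PORT B =====
-- one iteration of B's loop body over (j, x) = enumerate(lista); state = (first, p, best)
def pvStepB (valor : Int) (st : PySem.Dict Int Int × Int × Int) (jx : Int × Int) : PySem.Dict Int Int × Int × Int :=
  let p := st.2.1 + jx.2
  let best :=
    match st.1.get? (p - valor) with
    | some i => if st.2.2 = -1 ∨ i < st.2.2 then i else st.2.2
    | none => st.2.2
  let first := if st.1.contains p then st.1 else st.1.insert p (jx.1 + 1)
  (first, p, best)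

def algoritmo_alt (lista : List Int) (valor : Int) : Int :=
  ((PySem.List.enumerate lista 0).foldl (pvStepB valor)
    (PySem.Dict.ofList [((0 : Int), (0 : Int))], 0, -1)).2.2

-- ===== PRECONDITION & SPEC =====
def Spec_algoritmo (lista : List Int) (valor : Int) (out : Int) : Prop := out = algoritmo_alt lista valor
instance (lista : List Int) (valor : Int) (out : Int) : Decidable (Spec_algoritmo lista valor out) := by unfold Spec_algoritmo; infer_instance

-- ===== CLAIM (what is proved, stated in full; the proofs are below) =====
def Claim_equal_algoritmo : Prop := ∀ (lista : List Int) (valor : Int), Dom_algoritmo lista valor → Spec_algoritmo lista valor (algoritmo lista valor)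

-- ===== LEMMAS AND PROOFS =====

-- prefix sum of the first k elements
def pvPre (lista : List Int) (k : Nat) : Int := (lista.take k).sum

-- 'some subarray starting at i and ending by index j sums to valor'
def pvCnd (lista : List Int) (valor : Int) (j i : Nat) : Bool :=
  (List.range (j+1)).any (fun k => decide (i < k) && (pvPre lista k == pvPre lista i + valor))

-- earliest index ≤ j whose prefix sum is v (specification of B's dict 'first')
def pvFs (lista : List Int) (j : Nat) (v : Int) : Option Int :=
  ((List.range (j+1)).find? (fun k => pvPre lista k == v)).map (fun k => (k : Int))

-- least i with pvCnd j i, else -1 (specification of B's 'best')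
def pvBs (lista : List Int) (valor : Int) (j : Nat) : Int :=
  match (List.range j).find? (pvCnd lista valor j) with
  | some i => (i : Int)
  | none => -1

theorem pv_find?_range_some (q : Nat → Bool) (m k : Nat) :
    (List.range m).find? q = some k ↔ (k < m ∧ q k = true ∧ ∀ j < k, q j = false) := by
  rw [List.find?_eq_some_iff_getElem]
  constructor
  · rintro ⟨hq, i, hi, hik, hmin⟩
    have hik' : i = k := by simpa using hik
    subst hik'
    simp only [List.getElem_range] at hq hmin
    exact ⟨by simpa using hi, hq, fun j hj => by simpa using hmin j (by simpa using hj)⟩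
  · rintro ⟨hk, hq, hmin⟩
    refine ⟨by simpa using hq, k, by simpa using hk, by simp, fun j hj => ?_⟩
    simpa using hmin j (by simpa using hj)

theorem pv_find?_range_none (q : Nat → Bool) (m : Nat) :
    (List.range m).find? q = none ↔ ∀ k < m, q k = false := by
  rw [List.find?_eq_none]; simp

theorem pvCnd_iff (lista : List Int) (valor : Int) (j i : Nat) :
    pvCnd lista valor j i = true ↔ ∃ k, i < k ∧ k ≤ j ∧ pvPre lista k = pvPre lista i + valor := by
  simp only [pvCnd, List.any_eq_true, List.mem_range, Bool.and_eq_true, decide_eq_true_eq, beq_iff_eq]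
  constructor
  · rintro ⟨k, h1, h2, h3⟩; exact ⟨k, h2, by omega, h3⟩
  · rintro ⟨k, h1, h2, h3⟩; exact ⟨k, by omega, h1, h3⟩

theorem pvPre_succ (lista : List Int) (j : Nat) (h : j < lista.length) :
    pvPre lista (j+1) = pvPre lista j + lista[j] := by
  simp [pvPre, List.sum_take_succ lista j h]

theorem pvInnerA_iff (lista : List Int) (valor : Int) :
    ∀ (cnt a : Nat) (s : Int), a ≤ lista.length → cnt = lista.length - a →
      (pvInnerA lista valor s (PySem.List.pyRange (a : Int) (lista.length : Int)) = true ↔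
        ∃ k, a < k ∧ k ≤ lista.length ∧ s + (pvPre lista k - pvPre lista a) = valor) := by
  intro cnt
  induction cnt with
  | zero =>
    intro a s ha hc
    rw [PySem.List.pyRange_one_eq_nil (by omega)]
    simp only [pvInnerA]
    constructor
    · intro h; cases h
    · rintro ⟨k, h1, h2, h3⟩; omega
  | succ n ih =>
    intro a s ha hc
    have hlt : a < lista.length := by omega
    rw [PySem.List.pyRange_one_cons (by exact_mod_cast hlt)]
    simp only [pvInnerA]
    have hget : PySem.List.pyGetD lista (a : Int) 0 = lista[a] := by
      rw [PySem.List.pyGetD_natCast]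
      exact List.getD_eq_getElem _ _ hlt
    rw [hget]
    by_cases heq : s + lista[a] = valor
    · simp only [heq, if_pos]
      constructor
      · intro _
        exact ⟨a+1, by omega, by omega, by rw [pvPre_succ lista a hlt]; ring_nf; linarith⟩
      · intro _; trivial
    · rw [if_neg heq]
      have hcast : ((a : Int) + 1) = ((a+1 : Nat) : Int) := by push_cast; ring
      rw [hcast, ih (a+1) (s + lista[a]) (by omega) (by omega)]
      constructor
      · rintro ⟨k, h1, h2, h3⟩
        refine ⟨k, by omega, h2, ?_⟩
        rw [pvPre_succ lista a hlt] at h3; linarith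
      · rintro ⟨k, h1, h2, h3⟩
        have hk : a + 1 < k ∨ k = a + 1 := by omega
        rcases hk with hk | rfl
        · refine ⟨k, hk, h2, ?_⟩
          rw [pvPre_succ lista a hlt]; linarith
        · exfalso
          rw [pvPre_succ lista a hlt] at h3
          apply heq; linarith

theorem pvOuterA_eq (lista : List Int) (valor : Int) :
    ∀ (cnt a : Nat), a ≤ lista.length → cnt = lista.length - a →
      pvOuterA lista valor (PySem.List.pyRange (a : Int) (lista.length : Int)) =
        match (List.range' a (lista.length - a)).find? (pvCnd lista valor lista.length) with
        | some i => (i : Int)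
        | none => -1 := by
  intro cnt
  induction cnt with
  | zero =>
    intro a ha hc
    rw [PySem.List.pyRange_one_eq_nil (by omega)]
    have h0 : lista.length - a = 0 := by omega
    rw [h0]
    simp [pvOuterA]
  | succ n ih =>
    intro a ha hc
    have hlt : a < lista.length := by omega
    rw [PySem.List.pyRange_one_cons (by exact_mod_cast hlt)]
    simp only [pvOuterA]
    have hcond : (pvInnerA lista valor 0 (PySem.List.pyRange (a : Int) (lista.length : Int)) = true)
        ↔ pvCnd lista valor lista.length a = true := by
      rw [pvInnerA_iff lista valor (lista.length - a) a 0 (by omega) rfl, pvCnd_iff]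
      constructor
      · rintro ⟨k, h1, h2, h3⟩; exact ⟨k, h1, h2, by linarith⟩
      · rintro ⟨k, h1, h2, h3⟩; exact ⟨k, h1, h2, by linarith⟩
    have hrange : lista.length - a = n + 1 := by omega
    rw [hrange, List.range'_succ]
    by_cases hc2 : pvCnd lista valor lista.length a = true
    · rw [if_pos (hcond.mpr hc2), List.find?_cons_of_pos (h := hc2)]
    · rw [if_neg (fun h => hc2 (hcond.mp h)), List.find?_cons_of_neg (h := by simpa using hc2)]
      have hcast : ((a : Int) + 1) = ((a+1 : Nat) : Int) := by push_cast; ring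
      rw [hcast, ih (a+1) (by omega) (by omega)]
      have h1 : lista.length - (a+1) = n := by omega
      rw [h1]

theorem algoritmo_eq_bs (lista : List Int) (valor : Int) :
    algoritmo lista valor = pvBs lista valor lista.length := by
  unfold algoritmo pvBs
  have h0 : (0 : Int) = ((0 : Nat) : Int) := rfl
  rw [h0, pvOuterA_eq lista valor lista.length 0 (by omega) (by omega)]
  rw [List.range_eq_range']
  simp

theorem pvCnd_step (lista : List Int) (valor : Int) (j i : Nat) :
    pvCnd lista valor (j+1) i =
      (pvCnd lista valor j i || (decide (i < j+1) && (pvPre lista (j+1) == pvPre lista i + valor))) := by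
  simp [pvCnd, List.range_succ (n := j+1)]

theorem pvCnd_self (lista : List Int) (valor : Int) (j : Nat) :
    pvCnd lista valor j j = false := by
  simp only [pvCnd, List.any_eq_false, List.mem_range]
  intro k hk
  simp only [Bool.and_eq_true, not_and, decide_eq_true_eq]
  intro h
  omega

theorem pvFs_step (lista : List Int) (j : Nat) (v : Int) :
    pvFs lista (j+1) v =
      match pvFs lista j v with
      | some i => some i
      | none => if pvPre lista (j+1) == v then some ((j+1 : Nat) : Int) else none := by
  unfold pvFs
  rw [List.range_succ (n := j+1), List.find?_append]
  cases h : (List.range (j+1)).find? (fun k => pvPre lista k == v) with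
  | none => simp [Option.or]; split <;> simp
  | some k => simp [Option.or]

theorem pvBs_step (lista : List Int) (valor : Int) (j : Nat) :
    pvBs lista valor (j+1) =
      match pvFs lista j (pvPre lista (j+1) - valor) with
      | some i => if pvBs lista valor j = -1 ∨ i < pvBs lista valor j then i else pvBs lista valor j
      | none => pvBs lista valor j := by
  cases hfs : (List.range (j+1)).find? (fun k => pvPre lista k == pvPre lista (j+1) - valor) with
  | none =>
    have hnone : ∀ k ≤ j, ¬ pvPre lista k = pvPre lista (j+1) - valor := by
      intro k hk h
      have := (pv_find?_range_none _ _).mp hfs k (by omega)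
      simp [h] at this
    have hfs' : pvFs lista j (pvPre lista (j+1) - valor) = none := by
      simp [pvFs, hfs]
    rw [hfs']
    have hstep : ∀ i ≤ j, pvCnd lista valor (j+1) i = pvCnd lista valor j i := by
      intro i hi
      rw [pvCnd_step]
      have h2 : (pvPre lista (j+1) == pvPre lista i + valor) = false := by
        simp only [beq_eq_false_iff_ne, ne_eq]
        intro h; exact hnone i hi (by linarith)
      simp [h2]
    unfold pvBs
    cases hbs : (List.range j).find? (pvCnd lista valor j) with
    | none =>
      have hnew : (List.range (j+1)).find? (pvCnd lista valor (j+1)) = none := by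
        rw [pv_find?_range_none]
        intro k hk
        rcases Nat.lt_or_ge k j with h | h
        · rw [hstep k (by omega)]
          exact (pv_find?_range_none _ _).mp hbs k h
        · have hkj : k = j := by omega
          subst hkj
          rw [hstep k le_rfl]
          exact pvCnd_self lista valor k
      rw [hnew]
    | some i1 =>
      obtain ⟨hi1, hq1, hmin1⟩ := (pv_find?_range_some _ _ _).mp hbs
      have hnew : (List.range (j+1)).find? (pvCnd lista valor (j+1)) = some i1 := by
        rw [pv_find?_range_some]
        refine ⟨by omega, by rw [hstep i1 (by omega)]; exact hq1, fun i hi => ?_⟩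
        rw [hstep i (by omega)]
        exact hmin1 i hi
      rw [hnew]
  | some k0 =>
    obtain ⟨hk0, hq0, hmin0⟩ := (pv_find?_range_some _ _ _).mp hfs
    rw [beq_iff_eq] at hq0
    have hmin0' : ∀ i < k0, pvPre lista i ≠ pvPre lista (j+1) - valor := by
      intro i hi h
      have := hmin0 i hi
      simp [h] at this
    have hfs' : pvFs lista j (pvPre lista (j+1) - valor) = some ((k0 : Int)) := by
      simp [pvFs, hfs]
    rw [hfs']
    have hq0' : pvCnd lista valor (j+1) k0 = true := by
      rw [pvCnd_iff]
      exact ⟨j+1, by omega, le_rfl, by linarith⟩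
    unfold pvBs
    cases hbs : (List.range j).find? (pvCnd lista valor j) with
    | none =>
      have hb : ∀ i < j, pvCnd lista valor j i = false := (pv_find?_range_none _ _).mp hbs
      have hnew : (List.range (j+1)).find? (pvCnd lista valor (j+1)) = some k0 := by
        rw [pv_find?_range_some]
        refine ⟨by omega, hq0', fun i hi => ?_⟩
        rw [pvCnd_step]
        have h1 : pvCnd lista valor j i = false := hb i (by omega)
        have h2 : (pvPre lista (j+1) == pvPre lista i + valor) = false := by
          simp only [beq_eq_false_iff_ne, ne_eq]
          intro h; exact hmin0' i hi (by linarith)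
        simp [h1, h2]
      rw [hnew]
      simp
    | some i1 =>
      obtain ⟨hi1, hq1, hmin1⟩ := (pv_find?_range_some _ _ _).mp hbs
      have hq1' : pvCnd lista valor (j+1) i1 = true := by
        rw [pvCnd_step, hq1]; simp
      have hmin : ∀ i < min k0 i1, pvCnd lista valor (j+1) i = false := by
        intro i hi
        rw [pvCnd_step]
        have h1 : pvCnd lista valor j i = false := hmin1 i (by omega)
        have h2 : (pvPre lista (j+1) == pvPre lista i + valor) = false := by
          simp only [beq_eq_false_iff_ne, ne_eq]
          intro h; exact hmin0' i (by omega) (by linarith)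
        simp [h1, h2]
      have hnew : (List.range (j+1)).find? (pvCnd lista valor (j+1)) = some (min k0 i1) := by
        rw [pv_find?_range_some]
        refine ⟨by omega, ?_, hmin⟩
        rcases Nat.le_total k0 i1 with h | h
        · rw [Nat.min_eq_left h]; exact hq0'
        · rw [Nat.min_eq_right h]; exact hq1'
      rw [hnew]
      show ((min k0 i1 : Nat) : Int) = if ((i1 : Int) = -1 ∨ (k0 : Int) < (i1 : Int)) then (k0 : Int) else (i1 : Int)
      have hmincast := Nat.cast_min (α := Int) (m := k0) (n := i1)
      have hne : ¬ ((i1 : Int) = -1) := by omega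
      by_cases hlt : (k0 : Int) < (i1 : Int)
      · rw [if_pos (Or.inr hlt)]; omega
      · rw [if_neg (by tauto)]; omega

theorem pvInvariant (lista : List Int) (valor : Int) :
    ∀ j, j ≤ lista.length →
      ∃ d : PySem.Dict Int Int,
        ((PySem.List.enumerate (lista.take j) 0).foldl (pvStepB valor)
          (PySem.Dict.ofList [((0 : Int), (0 : Int))], 0, -1)) = (d, pvPre lista j, pvBs lista valor j)
        ∧ ∀ v, d.get? v = pvFs lista j v := by
  intro j
  induction j with
  | zero =>
    intro _
    refine ⟨PySem.Dict.ofList [((0 : Int), (0 : Int))], ?_, ?_⟩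
    · simp [PySem.List.enumerate_nil, pvPre, pvBs]
    · intro v
      rw [show (PySem.Dict.ofList [((0:Int),(0:Int))]) = (PySem.Dict.empty.insert 0 0) from rfl,
          PySem.Dict.get?_insert]
      simp only [pvFs]
      by_cases hv : v = 0
      · subst hv
        simp [pvPre]
      · rw [if_neg hv]
        have hb : (pvPre lista 0 == v) = false := by
          simp [pvPre]; omega
        simp [hb, PySem.Dict.empty, PySem.Dict.get?]
  | succ j ih =>
    intro hj
    obtain ⟨d, hfold, hget⟩ := ih (by omega)
    have hjl : j < lista.length := by omega
    have htake : lista.take (j+1) = lista.take j ++ [lista[j]] := by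
      rw [List.take_add_one]
      simp [List.getElem?_eq_getElem hjl]
    have hlen : (lista.take j).length = j := by simp; omega
    rw [htake, PySem.List.enumerate_append, hlen, List.foldl_append, hfold]
    have henum1 : PySem.List.enumerate [lista[j]] ((0 : Int) + (j : Int)) = [((j : Int), lista[j])] := by
      rw [PySem.List.enumerate_cons, PySem.List.enumerate_nil]
      norm_num
    rw [henum1]
    simp only [List.foldl_cons, List.foldl_nil]
    unfold pvStepB
    simp only []
    have hp : pvPre lista j + lista[j] = pvPre lista (j+1) := (pvPre_succ lista j hjl).symm
    have hlook : d.get? (pvPre lista j + lista[j] - valor) = pvFs lista j (pvPre lista (j+1) - valor) := by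
      rw [hget, hp]
    by_cases hc : d.contains (pvPre lista j + lista[j]) = true
    · refine ⟨d, ?_, ?_⟩
      · rw [if_pos hc]
        have hbest : (match d.get? (pvPre lista j + lista[j] - valor) with
            | some i => if pvBs lista valor j = -1 ∨ i < pvBs lista valor j then i else pvBs lista valor j
            | none => pvBs lista valor j) = pvBs lista valor (j+1) := by
          rw [hlook, pvBs_step]
        rw [hp] at hbest ⊢
        rw [hbest]
      · intro v
        rw [hget, pvFs_step]
        have hsome : pvFs lista j (pvPre lista (j+1)) ≠ none := by
          rw [← hget, ← hp]
          intro h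
          rw [PySem.Dict.get?_eq_none_iff_contains] at h
          rw [hc] at h; cases h
        cases hfs : pvFs lista j v with
        | some i => rfl
        | none =>
          simp only []
          have hb : (pvPre lista (j+1) == v) = false := by
            by_cases h : pvPre lista (j+1) = v
            · exfalso; apply hsome; rw [h]; exact hfs
            · simp [h]
          rw [hb]
          simp
    · have hc' : d.contains (pvPre lista j + lista[j]) = false := by
        simpa using hc
      refine ⟨d.insert (pvPre lista j + lista[j]) ((j : Int) + 1), ?_, ?_⟩
      · rw [if_neg (by simp [hc'])]
        have hbest : (match d.get? (pvPre lista j + lista[j] - valor) with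
            | some i => if pvBs lista valor j = -1 ∨ i < pvBs lista valor j then i else pvBs lista valor j
            | none => pvBs lista valor j) = pvBs lista valor (j+1) := by
          rw [hlook, pvBs_step]
        rw [hp] at hbest ⊢
        rw [hbest]
      · intro v
        have hnone : pvFs lista j (pvPre lista (j+1)) = none := by
          rw [← hget, ← hp, PySem.Dict.get?_eq_none_iff_contains, hc']
        rw [PySem.Dict.get?_insert, pvFs_step]
        by_cases hv : v = pvPre lista j + lista[j]
        · rw [if_pos hv, hv, hp, hnone]
          simp only [beq_self_eq_true, if_pos]
          push_cast
          rfl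
        · rw [if_neg hv, hget]
          cases hfs : pvFs lista j v with
          | some i => rfl
          | none =>
            simp only []
            have hb : (pvPre lista (j+1) == v) = false := by
              rw [← hp] at *
              simp only [beq_eq_false_iff_ne, ne_eq]
              intro h; exact hv h.symm
            rw [hb]
            simp

theorem algoritmo_alt_eq_bs (lista : List Int) (valor : Int) :
    algoritmo_alt lista valor = pvBs lista valor lista.length := by
  obtain ⟨d, hfold, -⟩ := pvInvariant lista valor lista.length le_rfl
  simp only [List.take_length] at hfold
  simp [algoritmo_alt, hfold]

-- ===== VERDICT (by name: the statement is the Claim_ definition above) =====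
theorem algoritmo_spec : Claim_equal_algoritmo := by
  intro lista valor _
  unfold Spec_algoritmo
  rw [algoritmo_eq_bs, algoritmo_alt_eq_bs]
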